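-- pv_equiv track=rewrite | github.com/981377660LMT/algorithm-study | tmp/376/3.py | emumeratePalindrome
-- ===== SOURCE A (Python) =====
-- from typing import Generator, Optional, Union
--
-- def emumeratePalindrome(
--     minLength: int, maxLength: int, reverse=False
-- ) -> Generator[str, None, None]:
--     """
--     遍历长度在 `[minLength, maxLength]` 之间的回文数字字符串.
--     maxLength <= 12.
--     """
--     if minLength > maxLength:
--         return
--     if reverse:
--         for length in reversed(range(minLength, maxLength + 1)):
--             start = 10 ** ((length - 1) >> 1)
--             end = start * 10 - 1
--             for half in reversed(range(start, end + 1)):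
--                 if length & 1:
--                     yield f"{half}{str(half)[:-1][::-1]}"
--                 else:
--                     yield f"{half}{str(half)[::-1]}"
--     else:
--         for length in range(minLength, maxLength + 1):
--             start = 10 ** ((length - 1) >> 1)
--             end = start * 10 - 1
--             for half in range(start, end + 1):
--                 if length & 1:
--                     yield f"{half}{str(half)[:-1][::-1]}"
--                 else:
--                     yield f"{half}{str(half)[::-1]}"
-- ===== SOURCE B (Python) =====
-- def _strings(first, rest, k):
--     """All k-char strings whose leading char is drawn from `first` and the
--     remaining chars from `rest`, in alphabet order (left-major).  Balanced
--     divide-and-conquer, so the recursion depth is only log2(k)."""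
--     if k < 1:
--         return
--     if k == 1:
--         yield from first
--         return
--     kl = (k + 1) // 2
--     for u in _strings(first, rest, kl):
--         for v in _strings(rest, rest, k - kl):
--             yield u + v
--
--
-- def emumeratePalindrome(minLength, maxLength, reverse=False):
--     digits = "9876543210" if reverse else "0123456789"
--     first = digits[:-1] if reverse else digits[1:]
--     lengths = (
--         range(maxLength, minLength - 1, -1) if reverse else range(minLength, maxLength + 1)
--     )
--     for length in lengths:
--         for half in _strings(first, digits, (length + 1) // 2):
--             yield half + half[: length // 2][::-1]
-- ===== Notes on version B (the rewrite author's own statement) =====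
-- stated objective: alternative
-- what changed: A enumerates integer halves with range(), converts each to a string with str() and mirrors it with a parity branch; B never touches integers inside the loop: a recursive digit-string generator produces the half strings directly (first digit from a no-zero alphabet, rest from the full alphabet, reversed alphabets for reverse order) and one uniform prefix-mirror formula builds the palindrome.
import Mathlib
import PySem

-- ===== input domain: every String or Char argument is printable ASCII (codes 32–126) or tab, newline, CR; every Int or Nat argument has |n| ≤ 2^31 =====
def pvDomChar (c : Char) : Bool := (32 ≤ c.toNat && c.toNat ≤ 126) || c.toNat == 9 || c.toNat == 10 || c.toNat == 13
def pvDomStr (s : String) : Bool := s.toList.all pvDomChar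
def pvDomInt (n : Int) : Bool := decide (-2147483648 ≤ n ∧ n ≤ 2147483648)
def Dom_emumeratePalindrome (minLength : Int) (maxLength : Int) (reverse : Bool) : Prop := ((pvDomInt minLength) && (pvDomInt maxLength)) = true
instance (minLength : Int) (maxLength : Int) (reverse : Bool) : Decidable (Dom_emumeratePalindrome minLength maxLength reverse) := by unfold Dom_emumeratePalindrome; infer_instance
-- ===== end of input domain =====

-- B replaces A's integer-half loop (int range + str() + parity branch) by a recursive
-- digit-string generator (no int→str conversion, one uniform mirror formula): objective 'alternative'.
-- Both programs are generators in Python; the equivalence is about the list of yielded strings.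

-- ===== PORT A =====
-- 10 ** e for a negative exponent e yields a Python float, on which the subsequent
-- range() raises TypeError; those inputs (a length ≤ 0 in the range) are outside Pre_,
-- so the `.toNat` on the exponent is exact on the admitted inputs.
def emumeratePalindrome (minLength : Int) (maxLength : Int) (reverse : Bool) : List String :=
  if minLength > maxLength then []
  else if reverse then
    ((PySem.List.pyRange minLength (maxLength + 1) 1).reverse).flatMap (fun (length : Int) =>
      let start : Int := 10 ^ ((length - 1) >>> (1 : Nat)).toNat
      let stop : Int := start * 10 - 1
      ((PySem.List.pyRange start (stop + 1) 1).reverse).map (fun half =>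
        if PySem.Int.band length 1 ≠ 0 then
          String.ofList (PySem.Int.toChars half ++
            (PySem.List.slice (PySem.Int.toChars half) none (some (-1))).reverse)
        else
          String.ofList (PySem.Int.toChars half ++ (PySem.Int.toChars half).reverse)))
  else
    (PySem.List.pyRange minLength (maxLength + 1) 1).flatMap (fun (length : Int) =>
      let start : Int := 10 ^ ((length - 1) >>> (1 : Nat)).toNat
      let stop : Int := start * 10 - 1
      (PySem.List.pyRange start (stop + 1) 1).map (fun half =>
        if PySem.Int.band length 1 ≠ 0 then
          String.ofList (PySem.Int.toChars half ++
            (PySem.List.slice (PySem.Int.toChars half) none (some (-1))).reverse)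
        else
          String.ofList (PySem.Int.toChars half ++ (PySem.Int.toChars half).reverse)))

-- ===== PORT B =====
-- _strings(first, rest, k): all k-char strings, first char from `first`, others from `rest`,
-- by balanced divide-and-conquer. Python's `if k < 1: return` is the k < 1 branch
-- (toNat sends every Python k ≤ 0 to 0).
def pvStrings (first rest : List Char) (k : Nat) : List (List Char) :=
  if k < 1 then []
  else if k = 1 then first.map (fun d => [d])
  else
    (pvStrings first rest ((k + 1) / 2)).flatMap (fun u =>
      (pvStrings rest rest (k - (k + 1) / 2)).map (fun v => u ++ v))
termination_by k
decreasing_by all_goals omega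

def emumeratePalindrome_alt (minLength : Int) (maxLength : Int) (reverse : Bool) : List String :=
  let digits : List Char := if reverse then "9876543210".toList else "0123456789".toList
  let first : List Char :=
    if reverse then PySem.List.slice digits none (some (-1))
    else PySem.List.slice digits (some 1) none
  let lengths : List Int :=
    if reverse then PySem.List.pyRange maxLength (minLength - 1) (-1)
    else PySem.List.pyRange minLength (maxLength + 1) 1
  lengths.flatMap (fun (length : Int) =>
    (pvStrings first digits (PySem.Int.floordiv (length + 1) 2).toNat).map (fun half =>
      String.ofList (half ++
        (PySem.List.slice half none (some (PySem.Int.floordiv length 2))).reverse)))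

-- ===== PRECONDITION & SPEC =====
-- Pre_ excludes exactly the inputs where Python A raises: a non-empty length range that
-- contains a length ≤ 0 (there 10 ** negative is a float and range() raises TypeError).
def Pre_emumeratePalindrome (minLength : Int) (maxLength : Int) (reverse : Bool) : Prop :=
  maxLength < minLength ∨ 1 ≤ minLength
instance (minLength : Int) (maxLength : Int) (reverse : Bool) : Decidable (Pre_emumeratePalindrome minLength maxLength reverse) := by unfold Pre_emumeratePalindrome; infer_instance
def pvWitness_emumeratePalindrome : Int × Int × Bool := (1, 3, false)

def Spec_emumeratePalindrome (minLength : Int) (maxLength : Int) (reverse : Bool) (out : List String) : Prop := out = emumeratePalindrome_alt minLength maxLength reverse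
instance (minLength : Int) (maxLength : Int) (reverse : Bool) (out : List String) : Decidable (Spec_emumeratePalindrome minLength maxLength reverse out) := by unfold Spec_emumeratePalindrome; infer_instance

-- ===== CLAIM (what is proved, stated in full; the proofs are below) =====
def Claim_equal_emumeratePalindrome : Prop := ∀ (minLength : Int) (maxLength : Int) (reverse : Bool), Dom_emumeratePalindrome minLength maxLength reverse → Pre_emumeratePalindrome minLength maxLength reverse → Spec_emumeratePalindrome minLength maxLength reverse (emumeratePalindrome minLength maxLength reverse)

-- ===== LEMMAS AND PROOFS =====

-- proof-side normal form of pvStrings: peel one leading char at a time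
def pvProd (first rest : List Char) : Nat → List (List Char)
  | 0 => []
  | 1 => first.map (fun d => [d])
  | k + 2 => first.flatMap (fun d => (pvProd rest rest (k + 1)).map (fun t => d :: t))

-- decimal digit characters of n, most significant first (the value Nat.toDigits 10 computes)
def pvRec (n : Nat) : List Char :=
  if _h : n < 10 then [Nat.digitChar n]
  else pvRec (n / 10) ++ [Nat.digitChar (n % 10)]
decreasing_by exact Nat.div_lt_self (by omega) (by omega)

lemma pvRec_lt {n : Nat} (h : n < 10) : pvRec n = [Nat.digitChar n] := by
  rw [pvRec]; simp [h]

lemma pvRec_step (n d : Nat) (hn : 1 ≤ n) (hd : d < 10) :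
    pvRec (10 * n + d) = pvRec n ++ [Nat.digitChar d] := by
  rw [pvRec]
  have h1 : ¬ (10 * n + d < 10) := by omega
  have h2 : (10 * n + d) / 10 = n := by omega
  have h3 : (10 * n + d) % 10 = d := by omega
  simp [h1, h2, h3]

lemma pv_core : ∀ (fuel n : Nat) (ds : List Char), n < fuel →
    Nat.toDigitsCore 10 fuel n ds = pvRec n ++ ds := by
  intro fuel
  induction fuel with
  | zero => intro n ds h; omega
  | succ fuel ih =>
    intro n ds h
    by_cases h10 : n < 10
    · have : n / 10 = 0 := by omega
      simp [Nat.toDigitsCore, this, pvRec_lt h10, Nat.mod_eq_of_lt h10]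
    · have hne : ¬ (n / 10 = 0) := by omega
      have hlt : n / 10 < fuel := by
        have := Nat.div_lt_self (by omega : 0 < n) (by omega : 1 < 10)
        omega
      rw [pvRec]
      simp only [Nat.toDigitsCore, hne, if_false, h10]
      rw [ih _ _ hlt]
      simp

lemma pv_toChars (n : Nat) : PySem.Int.toChars (n : Int) = pvRec n := by
  simp [PySem.Int.toChars, Nat.toDigits, pv_core (n + 1) n [] (by omega)]

-- all m-char strings over the decimal digits, lexicographically (leading zeros allowed)
def pvTails : Nat → List (List Char)
  | 0 => [[]]
  | m + 1 => ("0123456789".toList).flatMap (fun d => (pvTails m).map (fun t => d :: t))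

lemma pvTails_length : ∀ m, ∀ t ∈ pvTails m, t.length = m := by
  intro m
  induction m with
  | zero => intro t ht; simp [pvTails] at ht; simp [ht]
  | succ m ih =>
    intro t ht
    simp only [pvTails, List.mem_flatMap, List.mem_map] at ht
    obtain ⟨d, _, u, hu, rfl⟩ := ht
    simp [ih u hu]

lemma pv_blockSum (S a : Int) (hS : 0 < S) (k : Nat) :
    PySem.List.pyRange a (a + k * S) 1
      = (List.range k).flatMap
          (fun d : Nat => PySem.List.pyRange (a + (d : Int) * S) (a + ((d : Int) + 1) * S) 1) := by
  induction k with
  | zero => simp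
  | succ k ih =>
    have hk : (0:Int) ≤ (k : Int) * S := mul_nonneg (by positivity) hS.le
    rw [List.range_succ, List.flatMap_append]
    rw [show a + ((k:Nat)+1 : Nat) * S = a + ((k:Int) + 1) * S by push_cast; ring]
    rw [PySem.List.pyRange_one_append a (a + k * S) (a + ((k:Int) + 1) * S)
        (by omega) (by nlinarith)]
    rw [ih]
    simp

lemma pv_main (m : Nat) : ∀ n : Nat, 1 ≤ n →
    (PySem.List.pyRange ((n : Int) * 10 ^ m) (((n : Int) + 1) * 10 ^ m) 1).map PySem.Int.toChars
      = (pvTails m).map (fun t => pvRec n ++ t) := by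
  induction m with
  | zero =>
    intro n hn
    simp only [pow_zero, mul_one, pvTails]
    rw [PySem.List.pyRange_one_singleton]
    simp [pv_toChars]
  | succ m ih =>
    intro n hn
    have hdig : "0123456789".toList = (List.range 10).map Nat.digitChar := by decide
    rw [show ((n:Int)) * 10 ^ (m+1) = ((10 * n : Nat) : Int) * 10 ^ m + (0:Nat) * 10 ^ m
          by push_cast; ring]
    rw [show ((n:Int) + 1) * 10 ^ (m+1)
          = (((10 * n : Nat) : Int) * 10 ^ m + (0:Nat) * 10 ^ m) + (10:Nat) * 10 ^ m
          by push_cast; ring]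
    rw [show (((10 * n : Nat) : Int) * 10 ^ m + (0:Nat) * 10 ^ m) = ((10 * n : Nat) : Int) * 10 ^ m
          by push_cast; ring]
    rw [pv_blockSum ((10:Int) ^ m) (((10 * n : Nat) : Int) * 10 ^ m) (by positivity) 10]
    rw [List.map_flatMap]
    conv_rhs => rw [pvTails, hdig]
    rw [List.map_flatMap, List.flatMap_map]
    apply List.flatMap_congr
    intro d hd
    have hd10 : d < 10 := by simpa using List.mem_range.mp hd
    rw [show ((10 * n : Nat) : Int) * 10 ^ m + (d:Int) * 10 ^ m
          = ((10 * n + d : Nat) : Int) * 10 ^ m by push_cast; ring]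
    rw [show ((10 * n : Nat) : Int) * 10 ^ m + ((d:Int) + 1) * 10 ^ m
          = (((10 * n + d : Nat) : Int) + 1) * 10 ^ m by push_cast; ring]
    rw [ih (10 * n + d) (by omega)]
    rw [List.map_map]
    apply List.map_congr_left
    intro t _
    simp [pvRec_step n d hn hd10]

lemma pvProd_eq (f : List Char) (m : Nat) :
    pvProd f ("0123456789".toList) (m + 1)
      = f.flatMap (fun d => (pvTails m).map (fun t => d :: t)) := by
  induction m generalizing f with
  | zero =>
    simp only [pvProd, pvTails]
    induction f with
    | nil => simp
    | cons d f ihf => simp [ihf]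
  | succ m ih =>
    show pvProd f ("0123456789".toList) (m + 2) = _
    rw [show m + 2 = (m + 1) + 1 from rfl]
    simp only [pvProd]
    rw [ih]
    rfl

lemma pv_fwd (m : Nat) :
    (PySem.List.pyRange ((10:Int) ^ m) ((10:Int) ^ m * 10) 1).map PySem.Int.toChars
      = pvProd ("123456789".toList) ("0123456789".toList) (m + 1) := by
  rw [pvProd_eq]
  have hF : "123456789".toList = (List.range 9).map (fun d => Nat.digitChar (1 + d)) := by decide
  rw [hF, List.flatMap_map]
  rw [show ((10:Int) ^ m) = (10:Int) ^ m + (0:Nat) * 10 ^ m by push_cast; ring]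
  rw [show ((10:Int) ^ m + (0:Nat) * 10 ^ m) * 10 = ((10:Int) ^ m + (0:Nat) * 10 ^ m) + (9:Nat) * 10 ^ m
        by push_cast; ring]
  rw [show ((10:Int) ^ m + (0:Nat) * 10 ^ m) = (10:Int) ^ m by push_cast; ring]
  rw [pv_blockSum ((10:Int) ^ m) ((10:Int) ^ m) (by positivity) 9]
  rw [List.map_flatMap]
  apply List.flatMap_congr
  intro d hd
  have hd9 : d < 9 := by simpa using List.mem_range.mp hd
  rw [show (10:Int) ^ m + (d:Int) * 10 ^ m = (((1 + d : Nat)) : Int) * 10 ^ m by push_cast; ring]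
  rw [show (10:Int) ^ m + ((d:Int) + 1) * 10 ^ m = ((((1 + d : Nat)) : Int) + 1) * 10 ^ m
        by push_cast; ring]
  rw [pv_main m (1 + d) (by omega)]
  apply List.map_congr_left
  intro t _
  simp [pvRec_lt (by omega : 1 + d < 10)]

lemma pvProd_rev : ∀ (k : Nat) (f r : List Char),
    pvProd f.reverse r.reverse k = (pvProd f r k).reverse := by
  intro k
  induction k with
  | zero => intro f r; simp [pvProd]
  | succ k ih =>
    intro f r
    cases k with
    | zero => simp [pvProd, List.map_reverse]
    | succ k' =>
      simp only [pvProd]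
      rw [ih r r, List.reverse_flatMap]
      apply List.flatMap_congr
      intro d _
      simp [List.map_reverse, Function.comp]


lemma pvProd_split (f r : List Char) (a b : Nat) (ha : 1 ≤ a) (hb : 1 ≤ b) :
    pvProd f r (a + b)
      = (pvProd f r a).flatMap (fun u => (pvProd r r b).map (fun v => u ++ v)) := by
  induction a generalizing f with
  | zero => omega
  | succ a ih =>
    cases a with
    | zero =>
      obtain ⟨b', rfl⟩ : ∃ b', b = b' + 1 := ⟨b - 1, by omega⟩
      rw [show 0 + 1 + (b' + 1) = b' + 2 by omega, show (0:Nat) + 1 = 1 by omega]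
      simp only [pvProd, List.flatMap_map]
      apply List.flatMap_congr
      intro d _
      simp
    | succ a' =>
      rw [show a' + 1 + 1 + b = (a' + b) + 2 by omega]
      simp only [pvProd]
      rw [show a' + b + 1 = (a' + 1) + b by omega, ih r (by omega)]
      simp only [List.flatMap_assoc, List.map_flatMap, List.flatMap_map, List.map_map,
        Function.comp_def, List.cons_append]

lemma pvStrings_eq : ∀ (k : Nat) (f r : List Char), pvStrings f r k = pvProd f r k := by
  intro k
  induction k using Nat.strong_induction_on with
  | _ k ih =>
    intro f r
    rcases Nat.lt_or_ge k 2 with hk | hk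
    · interval_cases k <;> simp [pvStrings, pvProd]
    · rw [pvStrings, if_neg (by omega : ¬ k < 1), if_neg (by omega : ¬ k = 1)]
      rw [ih _ (by omega), ih _ (by omega)]
      rw [← pvProd_split f r ((k + 1) / 2) (k - (k + 1) / 2) (by omega) (by omega)]
      rw [show (k + 1) / 2 + (k - (k + 1) / 2) = k by omega]

-- the two yield expressions agree on every half of the right length
lemma pv_yield_eq (L : Int) (hL : 1 ≤ L) (t : List Char)
    (ht : t.length = ((L - 1) >>> (1 : Nat)).toNat + 1) :
    (if PySem.Int.band L 1 ≠ 0 then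
        String.ofList (t ++ (PySem.List.slice t none (some (-1))).reverse)
      else String.ofList (t ++ t.reverse))
    = String.ofList (t ++
        (PySem.List.slice t none (some (PySem.Int.floordiv L 2))).reverse) := by
  have hsh : (L - 1) >>> (1 : Nat) = (L - 1) / 2 := by
    simp [Int.shiftRight_eq_div_pow]
  have hfd : PySem.Int.floordiv L 2 = L / 2 :=
    PySem.Int.floordiv_eq_ediv_of_pos (by omega)
  have hband : PySem.Int.band L 1 = PySem.Int.mod L 2 := PySem.Int.band_one L
  have hmod : PySem.Int.mod L 2 = L % 2 := PySem.Int.mod_eq_emod_of_pos (by omega)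
  rw [hfd, PySem.List.slice_to t (by omega : (0:Int) ≤ L / 2)]
  by_cases hpar : L % 2 = 1
  · -- odd length: the half's last char is the middle, mirror the first (L/2) chars
    have hcond : PySem.Int.band L 1 ≠ 0 := by rw [hband, hmod, hpar]; omega
    rw [if_pos hcond, PySem.List.slice_to_neg_one, List.dropLast_eq_take]
    have : (L / 2).toNat = t.length - 1 := by
      rw [hsh] at ht; omega
    rw [this]
  · -- even length: the mirror is the whole half reversed
    have hpar0 : L % 2 = 0 := by omega
    have hcond : ¬ PySem.Int.band L 1 ≠ 0 := by rw [hband, hmod, hpar0]; simp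
    rw [if_neg hcond]
    have : (L / 2).toNat = t.length := by
      rw [hsh] at ht; omega
    rw [this, List.take_length]

lemma pv_k_eq (L : Int) (hL : 1 ≤ L) :
    (PySem.Int.floordiv (L + 1) 2).toNat = ((L - 1) >>> (1 : Nat)).toNat + 1 := by
  have hsh : (L - 1) >>> (1 : Nat) = (L - 1) / 2 := by simp [Int.shiftRight_eq_div_pow]
  have hfd : PySem.Int.floordiv (L + 1) 2 = (L + 1) / 2 :=
    PySem.Int.floordiv_eq_ediv_of_pos (by omega)
  rw [hsh, hfd]; omega

-- forward inner loop: A's half-range map equals B's generated half list map, per length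
lemma pv_inner_fwd (L : Int) (hL : 1 ≤ L) :
    (PySem.List.pyRange ((10:Int) ^ ((L - 1) >>> (1 : Nat)).toNat)
        ((10:Int) ^ ((L - 1) >>> (1 : Nat)).toNat * 10 - 1 + 1) 1).map (fun half =>
      if PySem.Int.band L 1 ≠ 0 then
        String.ofList (PySem.Int.toChars half ++
          (PySem.List.slice (PySem.Int.toChars half) none (some (-1))).reverse)
      else
        String.ofList (PySem.Int.toChars half ++ (PySem.Int.toChars half).reverse))
    = (pvProd ("123456789".toList) ("0123456789".toList)
        (PySem.Int.floordiv (L + 1) 2).toNat).map (fun half =>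
      String.ofList (half ++
        (PySem.List.slice half none (some (PySem.Int.floordiv L 2))).reverse)) := by
  rw [pv_k_eq L hL]
  set e : Nat := ((L - 1) >>> (1 : Nat)).toNat with he
  show (PySem.List.pyRange ((10:Int) ^ e) ((10:Int) ^ e * 10 - 1 + 1) 1).map
      ((fun t => if PySem.Int.band L 1 ≠ 0 then
          String.ofList (t ++ (PySem.List.slice t none (some (-1))).reverse)
        else String.ofList (t ++ t.reverse)) ∘ PySem.Int.toChars) = _
  rw [← List.map_map]
  rw [show (10:Int) ^ e * 10 - 1 + 1 = (10:Int) ^ e * 10 by ring]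
  rw [pv_fwd e]
  apply List.map_congr_left
  intro t ht
  have hlen : t.length = e + 1 := by
    rw [pvProd_eq] at ht
    simp only [List.mem_flatMap, List.mem_map] at ht
    obtain ⟨d, _, u, hu, rfl⟩ := ht
    simp [pvTails_length e u hu]
  exact pv_yield_eq L hL t (by rw [hlen])

-- ===== VERDICT (by name: the statement is the Claim_ definition above) =====
theorem emumeratePalindrome_spec : Claim_equal_emumeratePalindrome := by
  intro minLength maxLength reverse _hdom hpre
  unfold Spec_emumeratePalindrome
  by_cases hgt : minLength > maxLength
  · cases reverse <;>
      simp [emumeratePalindrome, emumeratePalindrome_alt, hgt,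
        PySem.List.pyRange_one_eq_nil (by omega : maxLength + 1 ≤ minLength),
        PySem.List.pyRange_neg_one_eq_nil (by omega : maxLength ≤ minLength - 1)]
  · have hmin : 1 ≤ minLength := by
      rcases hpre with h | h
      · omega
      · exact h
    cases reverse
    · -- forward
      simp only [emumeratePalindrome, emumeratePalindrome_alt, if_neg hgt,
        Bool.false_eq_true, if_false]
      have hfirst : PySem.List.slice ("0123456789".toList) (some 1) none
          = "123456789".toList := by decide
      rw [hfirst]
      simp only [pvStrings_eq]
      apply List.flatMap_congr
      intro L hLmem
      have hL : 1 ≤ L := by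
        have := (PySem.List.mem_pyRange_one).mp hLmem
        omega
      exact pv_inner_fwd L hL
    · -- reverse
      simp only [emumeratePalindrome, emumeratePalindrome_alt, if_neg hgt, if_true]
      have hdigR : ("9876543210".toList) = ("0123456789".toList).reverse := by decide
      have hfirstR : PySem.List.slice ("9876543210".toList) none (some (-1))
          = ("123456789".toList).reverse := by decide
      rw [hfirstR, PySem.List.pyRange_neg_one_eq_reverse,
        show minLength - 1 + 1 = minLength by ring]
      simp only [pvStrings_eq]
      apply List.flatMap_congr
      intro L hLmem
      have hL : 1 ≤ L := by
        rw [List.mem_reverse] at hLmem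
        have := (PySem.List.mem_pyRange_one).mp hLmem
        omega
      rw [List.map_reverse, pv_inner_fwd L hL, hdigR, pvProd_rev, List.map_reverse]
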